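-- pv_equiv track=rewrite | github.com/matichorvat/hsst | hsst/rulextraction/rule_type.py | is_basic_conj
-- ===== SOURCE A (Python) =====
-- def get_node_pos(node):
--     if len(node.split('_')) >= 3:
--         return node.split('_')[2]
--     else:
--         return ''
--
-- def is_nonterminal(node):
--     return node.startswith('X')
--
-- def is_conj(node):
--     return get_node_pos(node) == 'c' or 'subord' in node or node == 'appos' or node.startswith('implicit_conj')
--
-- def is_basic_conj(nodes, edges):
--     if not len(nodes) >= 3 or not len(edges) >= 2:
--         return False
--
--     conj_index = None
--     for index, node in enumerate(nodes):
--         if is_conj(node) and conj_index is None: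
--             conj_index = str(index)
--
--         elif not is_nonterminal(node):
--             return False
--
--     if conj_index is None:
--         return False
--
--     return True
-- ===== SOURCE B (Python) =====
-- def get_node_pos(node):
--     if len(node.split('_')) >= 3:
--         return node.split('_')[2]
--     else:
--         return ''
--
-- def is_nonterminal(node):
--     return node.startswith('X')
--
-- def is_conj(node):
--     return get_node_pos(node) == 'c' or 'subord' in node or node == 'appos' or node.startswith('implicit_conj')
--
-- def _summary(ns):
--     # For a nonempty segment, return (has_conj, all_nonterminal, good) where
--     # good = segment contains a conj, everything before its first conj is a
--     # nonterminal, and everything after its first conj is a nonterminal.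
--     if len(ns) == 1:
--         n = ns[0]
--         return (is_conj(n), is_nonterminal(n), is_conj(n))
--     mid = len(ns) // 2
--     c1, x1, g1 = _summary(ns[:mid])
--     c2, x2, g2 = _summary(ns[mid:])
--     return (c1 or c2, x1 and x2, (g1 and x2) if c1 else (x1 and g2))
--
-- def is_basic_conj(nodes, edges):
--     if len(nodes) < 3 or len(edges) < 2:
--         return False
--     return _summary(nodes)[2]
-- ===== Notes on version B (the rewrite author's own statement) =====
-- stated objective: alternative
-- what changed: Replaces A's stateful left-to-right loop (optional conj_index with early return) by a divide-and-conquer that halves the node list and merges per-segment summaries (has-conj, all-nonterminal, good) with an associative combine rule.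
import Mathlib
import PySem

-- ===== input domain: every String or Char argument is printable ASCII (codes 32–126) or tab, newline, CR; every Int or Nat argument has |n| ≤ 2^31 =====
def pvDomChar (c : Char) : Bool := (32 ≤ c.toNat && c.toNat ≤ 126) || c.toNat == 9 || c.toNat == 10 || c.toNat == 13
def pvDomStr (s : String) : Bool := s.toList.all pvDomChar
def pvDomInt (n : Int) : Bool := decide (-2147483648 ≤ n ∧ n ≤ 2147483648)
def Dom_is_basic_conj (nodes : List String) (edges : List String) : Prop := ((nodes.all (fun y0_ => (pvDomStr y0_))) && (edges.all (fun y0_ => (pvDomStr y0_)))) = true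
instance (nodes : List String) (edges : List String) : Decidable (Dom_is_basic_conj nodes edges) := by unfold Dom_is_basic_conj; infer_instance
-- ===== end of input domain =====

-- B replaces A's stateful left-to-right loop (optional conj_index with early return) by a
-- divide-and-conquer that halves the node list and merges per-segment summaries
-- (has-conj, all-nonterminal, good). Objective: alternative algorithm; same cost.


-- ===== PORT A =====
def get_node_pos (node : String) : String :=
  let parts := (PySem.Str.split? node "_").getD []
  if parts.length ≥ 3 then (PySem.List.pyGet? parts 2).getD "" else ""

def is_nonterminal (node : String) : Bool := PySem.Str.startswith node "X"

def is_conj (node : String) : Bool :=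
  get_node_pos node == "c" || PySem.Str.isIn "subord" node || node == "appos"
    || PySem.Str.startswith node "implicit_conj"

-- the for-loop of A: state = conj_index (None / str(index))
def is_basic_conj_loop : List (Int × String) → Option String → Bool
  | [], conj_index => conj_index.isSome
  | (index, node) :: rest, conj_index =>
    if is_conj node && conj_index.isNone then
      is_basic_conj_loop rest (some (PySem.Int.toStr index))
    else if !is_nonterminal node then false
    else is_basic_conj_loop rest conj_index

def is_basic_conj (nodes : List String) (edges : List String) : Bool :=
  if !(nodes.length ≥ 3) || !(edges.length ≥ 2) then false
  else is_basic_conj_loop (PySem.List.enumerate nodes 0) none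

-- ===== PORT B =====  (Source B's helper copies are identical to the module helpers above; reused)
-- divide-and-conquer summary of a segment: (has_conj, all_nonterminal, good);
-- the [] case is unreachable from is_basic_conj_alt (guard gives length ≥ 3, halves are nonempty)
def summary_b : List String → Bool × Bool × Bool
  | [] => (false, true, false)
  | [n] => (is_conj n, is_nonterminal n, is_conj n)
  | n :: m :: rest =>
    let ns := n :: m :: rest
    let mid := ns.length / 2
    let (c1, x1, g1) := summary_b (ns.take mid)
    let (c2, x2, g2) := summary_b (ns.drop mid)
    (c1 || c2, x1 && x2, if c1 then g1 && x2 else x1 && g2)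
termination_by ns => ns.length
decreasing_by
  · simp [List.length_take]; omega
  · simp; omega

def is_basic_conj_alt (nodes : List String) (edges : List String) : Bool :=
  if nodes.length < 3 || edges.length < 2 then false
  else (summary_b nodes).2.2

-- ===== PRECONDITION & SPEC =====
def Spec_is_basic_conj (nodes : List String) (edges : List String) (out : Bool) : Prop := out = is_basic_conj_alt nodes edges
instance (nodes : List String) (edges : List String) (out : Bool) : Decidable (Spec_is_basic_conj nodes edges out) := by unfold Spec_is_basic_conj; infer_instance

-- ===== CLAIM (what is proved, stated in full; the proofs are below) =====
def Claim_equal_is_basic_conj : Prop := ∀ (nodes : List String) (edges : List String), Dom_is_basic_conj nodes edges → Spec_is_basic_conj nodes edges (is_basic_conj nodes edges)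

-- ===== LEMMAS AND PROOFS =====

-- sequential specification of the 'good' component
def goodSpec : List String → Bool
  | [] => false
  | h :: t => if is_conj h then t.all is_nonterminal else (is_nonterminal h && goodSpec t)

-- goodSpec splits over append (for nonempty left part)
theorem goodSpec_append (l r : List String) (hl : l ≠ []) :
    goodSpec (l ++ r) =
      if l.any is_conj then goodSpec l && r.all is_nonterminal
      else l.all is_nonterminal && goodSpec r := by
  induction l with
  | nil => exact absurd rfl hl
  | cons h t ih =>
    cases ht : t with
    | nil => cases hc : is_conj h <;> simp [goodSpec, hc]
    | cons a b =>
      have hih := ih (by simp [ht])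
      cases hc : is_conj h with
      | true => simp [goodSpec, hc, List.all_append, Bool.and_assoc]
      | false =>
        rw [← ht] at *
        simp only [List.cons_append, goodSpec, hc, if_false, Bool.false_eq_true, hih,
          List.any_cons, List.all_cons, Bool.false_or]
        cases hany : t.any is_conj <;> cases hx : is_nonterminal h <;> simp

-- the divide-and-conquer summary computes (any conj, all nonterminal, goodSpec)
theorem summary_b_eq (ns : List String) :
    summary_b ns = (ns.any is_conj, ns.all is_nonterminal, goodSpec ns) := by
  fun_induction summary_b with
  | case1 => simp [goodSpec]
  | case2 n => cases hc : is_conj n <;> simp [goodSpec, hc]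
  | case3 n m rest ns mid c1 x1 g1 hx1 c2 x2 g2 hx2 ihl ihr =>
    have h1 : (c1, x1, g1) = ((List.take mid ns).any is_conj,
        (List.take mid ns).all is_nonterminal, goodSpec (List.take mid ns)) := hx1.symm.trans ihl
    have h2 : (c2, x2, g2) = ((List.drop mid ns).any is_conj,
        (List.drop mid ns).all is_nonterminal, goodSpec (List.drop mid ns)) := hx2.symm.trans ihr
    simp only [Prod.mk.injEq] at h1 h2
    obtain ⟨rfl, rfl, rfl⟩ := h1
    obtain ⟨rfl, rfl, rfl⟩ := h2
    have hmid1 : 1 ≤ mid := by show 1 ≤ (n :: m :: rest).length / 2; simp; omega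
    have htne : List.take mid ns ≠ [] := by
      intro h
      rcases List.take_eq_nil_iff.mp h with h' | h'
      · omega
      · exact absurd (show (n :: m :: rest) = ([] : List String) from h') (by simp)
    have hsplit' : List.take mid ns ++ List.drop mid ns = n :: m :: rest :=
      List.take_append_drop _ _
    conv_rhs => rw [← hsplit']
    rw [goodSpec_append _ _ htne, List.any_append, List.all_append]

-- once conj_index is set, the rest of A's loop just demands every node be a nonterminal
theorem loop_some (ns : List String) (s : Int) (t : String) :
    is_basic_conj_loop (PySem.List.enumerate ns s) (some t) = ns.all is_nonterminal := by
  induction ns generalizing s t with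
  | nil => simp [PySem.List.enumerate, is_basic_conj_loop]
  | cons n ns ih =>
    rw [PySem.List.enumerate_cons]
    simp only [is_basic_conj_loop, Option.isNone_some, Bool.and_false, List.all_cons]
    cases h : is_nonterminal n <;> simp [ih]

-- A's loop in the no-conjunction-yet state computes exactly goodSpec
theorem loop_none (ns : List String) (s : Int) :
    is_basic_conj_loop (PySem.List.enumerate ns s) none = goodSpec ns := by
  induction ns generalizing s with
  | nil => simp [PySem.List.enumerate, is_basic_conj_loop, goodSpec]
  | cons n ns ih =>
    rw [PySem.List.enumerate_cons]
    cases hc : is_conj n with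
    | true =>
      simp only [is_basic_conj_loop, hc, Option.isNone_none, Bool.and_true, if_true,
        goodSpec, loop_some]
    | false =>
      simp only [is_basic_conj_loop, hc, Bool.false_and, goodSpec, if_false, Bool.false_eq_true]
      cases h : is_nonterminal n <;> simp [ih]

-- ===== VERDICT (by name: the statement is the Claim_ definition above) =====
theorem is_basic_conj_spec : Claim_equal_is_basic_conj := by
  intro nodes edges _
  unfold Spec_is_basic_conj is_basic_conj is_basic_conj_alt
  by_cases h3 : nodes.length ≥ 3
  · by_cases h2 : edges.length ≥ 2
    · rw [if_neg (by simp; omega), if_neg (by simp; omega), summary_b_eq, loop_none]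
    · rw [if_pos (by simp; omega), if_pos (by simp; omega)]
  · rw [if_pos (by simp; omega), if_pos (by simp; omega)]
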